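-- pv_equiv track=rewrite | github.com/pypi-data/pypi-mirror-253 | packages/Adon/Adon-1.0.2.tar.gz/Adon-1.0.2/src/adon/adon.py | loadSInt
-- ===== SOURCE A (Python) =====
-- def loadSInt(obj, pointer):
--     ptr = pointer
--     length = obj[ptr] - ((obj[ptr] >> 4) << 4)
--     ptr += 1
--
--     selected = obj[ptr:ptr+length]
--     val = ""
--     for i in selected:
--         val += format(i, "08b")
--
--     sign = val[0]
--     val  = val[1:]
--
--     if sign == "1":
--         val = int(val, 2) - 2**len(val)
--     else:
--         val = int(val, 2)
--
--     return val, ptr+length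
-- ===== SOURCE B (Python) =====
-- def loadSInt(obj, pointer):
--     length = obj[pointer] & 0x0F
--     ptr = pointer + 1
--     selected = obj[ptr:ptr + length]
--     negative = selected[0] >> 7
--     num = 0
--     for b in selected:
--         num = num * 256 + b
--     if negative:
--         num -= 1 << (8 * len(selected))
--     return num, ptr + length
-- ===== Notes on version B (the rewrite author's own statement) =====
-- stated objective: simpler
-- what changed: B drops A's intermediate binary-string build and int(val,2) re-parse, decoding the selected bytes in one integer-accumulation pass (num = num*256 + b) and subtracting 2^(8*len) when the sign bit of the first byte is set.
-- outside the precondition, e.g. on loadSInt([1, -1], 0): A returns (1, 2), B returns (-257, 2); on loadSInt([1, 256], 0): A returns (-256, 2), B returns (0, 2)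
import Mathlib
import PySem

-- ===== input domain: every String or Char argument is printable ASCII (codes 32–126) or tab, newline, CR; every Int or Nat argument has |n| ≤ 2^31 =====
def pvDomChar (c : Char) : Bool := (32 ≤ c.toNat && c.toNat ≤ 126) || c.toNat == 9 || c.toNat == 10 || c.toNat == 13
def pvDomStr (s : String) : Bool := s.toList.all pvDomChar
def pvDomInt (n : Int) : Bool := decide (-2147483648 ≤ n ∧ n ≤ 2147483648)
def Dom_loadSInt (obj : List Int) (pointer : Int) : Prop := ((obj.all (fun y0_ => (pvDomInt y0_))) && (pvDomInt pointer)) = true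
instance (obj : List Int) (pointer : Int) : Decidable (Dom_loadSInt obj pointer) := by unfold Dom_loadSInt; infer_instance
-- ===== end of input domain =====

-- B replaces A's two passes (build a binary string, re-parse it with int(·,2)) by one integer
-- accumulation pass over the selected bytes (simpler decomposition, no intermediate string).

-- ===== PORT A =====
-- format(i, "08b"): binary digits zero-padded to total width 8 (the '-' of a negative number
-- counts toward the width); exact for every Int
def pad0 (w : Nat) (cs : List Char) : List Char := List.replicate (w - cs.length) '0' ++ cs
def fmt08b (i : Int) : List Char :=
  if i < 0 then '-' :: pad0 7 (Nat.toDigits 2 (-i).toNat) else pad0 8 (Nat.toDigits 2 i.toNat)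
-- int(val, 2): exact on strings of '0'/'1' digits, which Pre_ guarantees val[1:] to be
def parseBin (cs : List Char) : Int := cs.foldl (fun a c => a * 2 + (if c = '1' then 1 else 0)) 0

def loadSInt (obj : List Int) (pointer : Int) : Int × Int :=
  let ptr := pointer
  let b := PySem.List.pyGetD obj ptr 0                 -- obj[ptr]; Pre_ keeps the index in range
  let length := b - ((b >>> (4 : Nat)) <<< (4 : Nat))  -- Python's >> / << on ints are Lean's >>> / <<<
  let ptr := ptr + 1
  let selected := PySem.List.slice obj (some ptr) (some (ptr + length))
  let val := selected.foldl (fun s i => s ++ fmt08b i) []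
  match val with
  | [] => (0, 0)                                       -- val[0]: IndexError, excluded by Pre_
  | sign :: rest =>
      ((if sign = '1' then parseBin rest - 2 ^ rest.length else parseBin rest), ptr + length)

-- ===== PORT B =====
def loadSInt_alt (obj : List Int) (pointer : Int) : Int × Int :=
  let length := PySem.Int.band (PySem.List.pyGetD obj pointer 0) 15   -- obj[pointer] & 0x0F
  let ptr := pointer + 1
  let selected := PySem.List.slice obj (some ptr) (some (ptr + length))
  match selected with
  | [] => (0, 0)                                       -- selected[0]: IndexError, excluded by Pre_
  | b0 :: _ =>
      let negative := b0 >>> (7 : Nat)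
      let num := selected.foldl (fun n b => n * 256 + b) 0
      let num := if negative ≠ 0 then num - ((1 : Int) <<< (8 * selected.length)) else num
      (num, ptr + length)

-- ===== PRECONDITION & SPEC =====
-- Pre_ excludes inputs where A raises (pointer out of range / empty selected: IndexError; a negative
-- byte after the first: ValueError) and inputs whose selected bytes fall outside 0..255 on which A
-- still returns: there A's fixed-width bit-string concatenation mixes field widths (byte ≥ 256) or
-- reads a leading '-' as the sign bit (negative first byte), accidental values of the string encoding.
def Pre_loadSInt (obj : List Int) (pointer : Int) : Prop :=
  PySem.Raise.InRange obj.length pointer ∧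
  PySem.List.slice obj (some (pointer + 1))
      (some (pointer + 1 + PySem.Int.band (PySem.List.pyGetD obj pointer 0) 15)) ≠ [] ∧
  ∀ x ∈ PySem.List.slice obj (some (pointer + 1))
      (some (pointer + 1 + PySem.Int.band (PySem.List.pyGetD obj pointer 0) 15)), 0 ≤ x ∧ x < 256
instance (obj : List Int) (pointer : Int) : Decidable (Pre_loadSInt obj pointer) := by
  unfold Pre_loadSInt; infer_instance

def pvWitness_loadSInt : List Int × Int := ([2, 200, 17], 0)

def Spec_loadSInt (obj : List Int) (pointer : Int) (out : Int × Int) : Prop := out = loadSInt_alt obj pointer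
instance (obj : List Int) (pointer : Int) (out : Int × Int) : Decidable (Spec_loadSInt obj pointer out) := by unfold Spec_loadSInt; infer_instance

-- ===== CLAIM (what is proved, stated in full; the proofs are below) =====
def Claim_equal_loadSInt : Prop := ∀ (obj : List Int) (pointer : Int), Dom_loadSInt obj pointer → Pre_loadSInt obj pointer → Spec_loadSInt obj pointer (loadSInt obj pointer)

-- ===== LEMMAS AND PROOFS =====

theorem band_fifteen (b : Int) : PySem.Int.band b 15 = b % 16 := by
  unfold PySem.Int.band
  by_cases h1 : 0 ≤ b
  · rw [if_pos h1, if_pos (by norm_num : (0:Int) ≤ 15)]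
    have h2 : b.toNat &&& Int.toNat 15 = b.toNat % 16 := by
      simpa using Nat.and_two_pow_sub_one_eq_mod b.toNat 4
    rw [h2]; omega
  · rw [if_neg h1, if_pos (by norm_num : (0:Int) ≤ 15)]
    have h2 : Int.toNat 15 &&& (-b - 1).toNat = (-b - 1).toNat % 16 := by
      rw [Nat.and_comm]
      simpa using Nat.and_two_pow_sub_one_eq_mod (-b - 1).toNat 4
    rw [h2]; omega

theorem lenA_eq (b : Int) : b - ((b >>> (4 : Nat)) <<< (4 : Nat)) = b % 16 := by
  rw [Int.shiftRight_eq_div_pow, Int.shiftLeft_eq]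
  norm_num; omega

theorem shift7_ne (b : Int) (h0 : 0 ≤ b) (h1 : b < 256) : (b >>> (7 : Nat) ≠ 0) ↔ 128 ≤ b := by
  rw [Int.shiftRight_eq_div_pow]; norm_num; omega

set_option maxRecDepth 8192 in
theorem fmt8_spec : ∀ n : Fin 256,
    (fmt08b (n : Int)).length = 8 ∧ parseBin (fmt08b (n : Int)) = (n : Int) ∧
    (fmt08b (n : Int)).headI = (if 128 ≤ n.val then '1' else '0') := by decide

theorem fmt8_spec' (x : Int) (h0 : 0 ≤ x) (h1 : x < 256) :
    (fmt08b x).length = 8 ∧ parseBin (fmt08b x) = x ∧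
    (fmt08b x).headI = (if 128 ≤ x then '1' else '0') := by
  have hx : x = ((⟨x.toNat, by omega⟩ : Fin 256) : Int) := by simp; omega
  obtain ⟨a, b, c⟩ := fmt8_spec ⟨x.toNat, by omega⟩
  rw [hx]
  refine ⟨a, b, ?_⟩
  rw [c]
  split_ifs with g1 g2 g2 <;> first | rfl | omega

theorem parse_foldl_acc (v : List Char) : ∀ a : Int,
    v.foldl (fun a c => a * 2 + (if c = '1' then 1 else 0)) a = a * 2 ^ v.length + parseBin v := by
  induction v with
  | nil => intro a; simp [parseBin]
  | cons c t ih =>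
      intro a
      simp only [List.foldl_cons, List.length_cons, parseBin]
      rw [ih, ih (0 * 2 + _)]
      ring

theorem parse_append (u v : List Char) :
    parseBin (u ++ v) = parseBin u * 2 ^ v.length + parseBin v := by
  unfold parseBin
  rw [List.foldl_append]
  exact parse_foldl_acc v _

theorem numfold_acc (t : List Int) : ∀ a : Int,
    t.foldl (fun n x => n * 256 + x) a = a * 256 ^ t.length + t.foldl (fun n x => n * 256 + x) 0 := by
  induction t with
  | nil => intro a; simp
  | cons x t ih =>
      intro a
      simp only [List.foldl_cons, List.length_cons]
      rw [ih, ih (0 * 256 + x)]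
      ring

theorem flat_spec (sel : List Int) (h : ∀ x ∈ sel, 0 ≤ x ∧ x < 256) :
    (sel.flatMap fmt08b).length = 8 * sel.length ∧
    parseBin (sel.flatMap fmt08b) = sel.foldl (fun n x => n * 256 + x) 0 := by
  induction sel with
  | nil => simp [parseBin]
  | cons b0 t ih =>
      obtain ⟨hb0, hb1⟩ := h b0 (List.mem_cons_self ..)
      obtain ⟨ihl, ihp⟩ := ih (fun x hx => h x (List.mem_cons_of_mem _ hx))
      obtain ⟨fl, fp, _⟩ := fmt8_spec' b0 hb0 hb1
      constructor
      · simp [List.flatMap_cons, fl, ihl]; ring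
      · rw [List.flatMap_cons, parse_append, fp, ihp, ihl,
            List.foldl_cons, numfold_acc t (0 * 256 + b0)]
        have : (256 : Int) ^ t.length = 2 ^ (8 * t.length) := by
          rw [pow_mul]; norm_num
        rw [this]; ring

-- ===== VERDICT (by name: the statement is the Claim_ definition above) =====
theorem loadSInt_spec : Claim_equal_loadSInt := by
  intro obj pointer _ hPre
  obtain ⟨_, hne, hbytes⟩ := hPre
  rw [band_fifteen] at hne hbytes
  unfold Spec_loadSInt
  simp only [loadSInt, loadSInt_alt, lenA_eq, band_fifteen]
  set sel := PySem.List.slice obj (some (pointer + 1))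
      (some (pointer + 1 + PySem.List.pyGetD obj pointer 0 % 16)) with hsel
  obtain ⟨b0, t, hS⟩ : ∃ b0 t, sel = b0 :: t := by
    cases h : sel with
    | nil => exact absurd h hne
    | cons b0 t => exact ⟨b0, t, rfl⟩
  rw [hS, PySem.List.foldl_append_eq_flatMap]
  simp only [List.nil_append]
  obtain ⟨hb00, hb01⟩ := hbytes b0 (by rw [hS]; exact List.mem_cons_self ..)
  obtain ⟨fl, fp, fh⟩ := fmt8_spec' b0 hb00 hb01
  obtain ⟨fll, flp⟩ := flat_spec (b0 :: t) (by rw [← hS]; exact hbytes)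
  obtain ⟨c, cs, hcons⟩ : ∃ c cs, fmt08b b0 = c :: cs := by
    cases hf : fmt08b b0 with
    | nil => rw [hf] at fl; simp at fl
    | cons c cs => exact ⟨c, cs, rfl⟩
  have hflat : (b0 :: t).flatMap fmt08b = c :: (cs ++ t.flatMap fmt08b) := by
    rw [List.flatMap_cons, hcons]; rfl
  rw [hflat]
  set rest := cs ++ List.flatMap fmt08b t with hrest
  change (if c = '1' then parseBin rest - 2 ^ rest.length else parseBin rest,
      pointer + 1 + PySem.List.pyGetD obj pointer 0 % 16) = _
  set n := (b0 :: t).length with hn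
  have hn1 : 1 ≤ n := by rw [hn]; simp
  have hrl : rest.length = 8 * n - 1 := by
    have h := fll
    rw [hflat] at h
    simp only [List.length_cons] at h
    omega
  have hc : c = if 128 ≤ b0 then '1' else '0' := by
    have := fh; rw [hcons] at this; simpa using this
  have hfull : parseBin (c :: rest) = List.foldl (fun n x => n * 256 + x) 0 (b0 :: t) := by
    rw [← hflat]; exact flp
  have hsplit : parseBin (c :: rest) = (if c = '1' then 1 else 0) * 2 ^ rest.length + parseBin rest := by
    simpa [parseBin] using parse_append [c] rest
  have hone : (1 : Int) <<< (8 * n) = 2 ^ (8 * n) := by rw [Int.shiftLeft_eq, one_mul]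
  have hpow : (2 : Int) ^ (8 * n - 1) * 2 = 2 ^ (8 * n) := by
    have h8 : 8 * n = (8 * n - 1) + 1 := by omega
    conv_rhs => rw [h8, pow_succ]
  rw [hfull] at hsplit
  by_cases hsgn : 128 ≤ b0
  · have hc1 : c = '1' := by rw [hc, if_pos hsgn]
    rw [if_pos hc1, if_pos ((shift7_ne b0 hb00 hb01).mpr hsgn), hone, Prod.mk.injEq]
    refine ⟨?_, rfl⟩
    rw [hc1, if_pos rfl, one_mul, hrl] at hsplit
    rw [hrl]
    linarith [hpow, hsplit]
  · have hc0 : c ≠ '1' := by rw [hc, if_neg hsgn]; decide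
    rw [if_neg hc0, if_neg (fun h => hsgn ((shift7_ne b0 hb00 hb01).mp h)), Prod.mk.injEq]
    refine ⟨?_, rfl⟩
    rw [if_neg hc0, zero_mul, zero_add] at hsplit
    omega
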